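-- pv_equiv track=rewrite | github.com/Kawser-nerd/CLCDSA | Source Codes/AtCoder/abc113/D/4908058.py | one_row
-- ===== SOURCE A (Python) =====
-- from itertools import product
-- from itertools import product
--
-- def one_row(W):
--     one_row_amida={i:{i:0 for i in range(W)} for i in range(W)}
--
--     for p in product([0,1], repeat=W-1):
--         if any([p[i]==1 and p[i+1]==1 for i in range(W-2)]):
--             continue
--         after = [i for i in range(W)]
--         for i in range(W-1):
--             if p[i]:
--                 after[i], after[i+1] = after[i+1], after[i]
--         for i, a in enumerate(after):
--             one_row_amida[i][a] += 1
--     return one_row_amida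
-- ===== SOURCE B (Python) =====
-- def one_row(W):
--     # Generates only the valid (no two adjacent swaps) patterns by a Fibonacci-style
--     # recursion instead of enumerating all 2**(W-1) tuples and filtering, and builds
--     # the resulting position map directly block by block instead of simulating swaps.
--     n = W - 1
--
--     def patterns(k):
--         if k == 0:
--             return [[]]
--         if k == 1:
--             return [[0], [1]]
--         return [[0] + p for p in patterns(k - 1)] + [[1, 0] + p for p in patterns(k - 2)]
--
--     def after_of(i, p):
--         if not p:
--             return [i]
--         if p[0] == 1:
--             if len(p) == 1:
--                 return [i + 1, i]
--             return [i + 1, i] + after_of(i + 2, p[2:])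
--         return [i] + after_of(i + 1, p[1:])
--
--     mat = {i: {j: 0 for j in range(W)} for i in range(W)}
--     for p in patterns(n):
--         for i, a in enumerate(after_of(0, p)):
--             mat[i][a] += 1
--     return mat
-- ===== Notes on version B (the rewrite author's own statement) =====
-- stated objective: alternative
-- what changed: B generates only the valid patterns (no two adjacent swaps) by a Fibonacci-style recursion and builds each resulting position map directly block by block, instead of enumerating every binary swap tuple, filtering out the invalid ones, and simulating the swaps sequentially; the enumeration shrinks from power-of-two size to Fibonacci size, though both remain exponential.
-- outside the precondition, e.g. on one_row(0): A raises ValueError, B raises RecursionError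
import Mathlib
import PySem

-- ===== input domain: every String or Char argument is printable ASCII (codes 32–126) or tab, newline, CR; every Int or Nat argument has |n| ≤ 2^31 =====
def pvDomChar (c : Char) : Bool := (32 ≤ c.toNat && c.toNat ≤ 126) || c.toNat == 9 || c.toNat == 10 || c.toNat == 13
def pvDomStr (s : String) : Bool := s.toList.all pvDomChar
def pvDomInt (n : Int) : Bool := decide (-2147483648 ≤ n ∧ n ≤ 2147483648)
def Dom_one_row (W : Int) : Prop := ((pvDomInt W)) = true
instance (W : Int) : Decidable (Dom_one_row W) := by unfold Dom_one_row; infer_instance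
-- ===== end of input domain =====

-- B generates only the valid (no-two-adjacent-swap) patterns by a Fibonacci-style recursion and
-- builds each position map directly block by block, instead of enumerating every binary tuple,
-- filtering, and simulating sequential swaps (objective: alternative — a far smaller enumeration,
-- though both remain exponential in W).

-- ===== PORT A =====
-- shared transliteration of code literally common to both Pythons:
-- the {i:{j:0}} initial dict comprehension and the 'for i, a in enumerate(after): m[i][a] += 1' tally loop
def pvInitMat (W : Int) : PySem.Dict Int (PySem.Dict Int Int) :=
  (PySem.List.pyRange 0 W 1).foldl (fun d i =>
    d.insert i ((PySem.List.pyRange 0 W 1).foldl (fun d2 j => d2.insert j 0) PySem.Dict.empty))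
    PySem.Dict.empty

def pvTally (m : PySem.Dict Int (PySem.Dict Int Int)) (aft : List Int) :
    PySem.Dict Int (PySem.Dict Int Int) :=
  (PySem.List.enumerate aft 0).foldl
    (fun m' ia => m'.modify ia.1 PySem.Dict.empty (fun row => row.modify ia.2 0 (· + 1))) m

-- itertools.product([0,1], repeat=n), in CPython's order (first coordinate varies slowest)
def pvTuples : Nat → List (List Int)
  | 0 => [[]]
  | n + 1 => (pvTuples n).map (fun p => 0 :: p) ++ (pvTuples n).map (fun p => 1 :: p)

-- any([p[i]==1 and p[i+1]==1 for i in range(W-2)])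
def pvCheckA (W : Int) (p : List Int) : Bool :=
  ((PySem.List.pyRange 0 (W - 2) 1).map (fun i =>
    decide (PySem.List.pyGetD p i 0 = 1) && decide (PySem.List.pyGetD p (i + 1) 0 = 1))).any id

-- one iteration of A's swap loop: 'if p[i]: after[i], after[i+1] = after[i+1], after[i]'
def pvStep (p : List Int) (a : List Int) (i : Int) : List Int :=
  if PySem.List.pyGetD p i 0 ≠ 0 then
    PySem.List.pySetD (PySem.List.pySetD a i (PySem.List.pyGetD a (i + 1) 0)) (i + 1)
      (PySem.List.pyGetD a i 0)
  else a

-- after = list(range(W)); for i in range(W-1): if p[i]: swap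
def pvAfterA (W : Int) (p : List Int) : List Int :=
  (PySem.List.pyRange 0 (W - 1) 1).foldl (pvStep p) (PySem.List.pyRange 0 W 1)

def one_row (W : Int) : List (Int × List (Int × Int)) :=
  let m := (pvTuples (W - 1).toNat).foldl
    (fun m p => if pvCheckA W p then m else pvTally m (pvAfterA W p)) (pvInitMat W)
  m.items.map (fun kv => (kv.1, kv.2.items))

-- ===== PORT B =====
-- patterns(k): valid patterns only, by Fibonacci-style recursion
def pvPatterns : Nat → List (List Int)
  | 0 => [[]]
  | 1 => [[0], [1]]
  | k + 2 => (pvPatterns (k + 1)).map (fun p => 0 :: p)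
      ++ (pvPatterns k).map (fun p => 1 :: 0 :: p)

-- after_of(i, p): build the position map block by block
def pvAfterOf : Int → List Int → List Int
  | i, [] => [i]
  | i, b :: q =>
    if b = 1 then
      match q with
      | [] => [i + 1, i]
      | _ :: q2 => (i + 1) :: i :: pvAfterOf (i + 2) q2
    else i :: pvAfterOf (i + 1) q

def one_row_alt (W : Int) : List (Int × List (Int × Int)) :=
  let m := (pvPatterns (W - 1).toNat).foldl (fun m p => pvTally m (pvAfterOf 0 p)) (pvInitMat W)
  m.items.map (fun kv => (kv.1, kv.2.items))

-- ===== PRECONDITION & SPEC =====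
-- Pre_ excludes W ≤ 0, where A raises ValueError (itertools.product with a negative repeat).
def Pre_one_row (W : Int) : Prop := 1 ≤ W
instance (W : Int) : Decidable (Pre_one_row W) := by unfold Pre_one_row; infer_instance
def pvWitness_one_row : Int := (3)

def Spec_one_row (W : Int) (out : List (Int × List (Int × Int))) : Prop := out = one_row_alt W
instance (W : Int) (out : List (Int × List (Int × Int))) : Decidable (Spec_one_row W out) := by
  unfold Spec_one_row; infer_instance

-- ===== CLAIM (what is proved, stated in full; the proofs are below) =====
def Claim_equal_one_row : Prop := ∀ (W : Int), Dom_one_row W → Pre_one_row W → Spec_one_row W (one_row W)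

-- ===== LEMMAS AND PROOFS =====

-- proof-side predicate: p has two adjacent 1s
def pvHasAdj : List Int → Bool
  | a :: b :: q => (decide (a = 1) && decide (b = 1)) || pvHasAdj (b :: q)
  | _ => false

lemma pvAfterOf_cons_zero (i : Int) (q : List Int) :
    pvAfterOf i (0 :: q) = i :: pvAfterOf (i + 1) q := by
  rw [pvAfterOf.eq_def]; norm_num

lemma pvAfterOf_one_nil (i : Int) : pvAfterOf i [1] = [i + 1, i] := by
  rw [pvAfterOf.eq_def]; norm_num

lemma pvAfterOf_one_cons (i c : Int) (q : List Int) :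
    pvAfterOf i (1 :: c :: q) = (i + 1) :: i :: pvAfterOf (i + 2) q := by
  rw [pvAfterOf.eq_def]; norm_num

lemma pvHasAdj_cons_zero (q : List Int) : pvHasAdj (0 :: q) = pvHasAdj q := by
  cases q <;> simp [pvHasAdj]

lemma pvHasAdj_one_zero (q : List Int) : pvHasAdj (1 :: 0 :: q) = pvHasAdj q := by
  simp [pvHasAdj, pvHasAdj_cons_zero]

lemma pvHasAdj_one_one (q : List Int) : pvHasAdj (1 :: 1 :: q) = true := by
  simp [pvHasAdj]

lemma pvTuples_length {n : Nat} {p : List Int} (h : p ∈ pvTuples n) : p.length = n := by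
  induction n generalizing p with
  | zero => simp [pvTuples] at h; simp [h]
  | succ n ih =>
    simp only [pvTuples, List.mem_append, List.mem_map] at h
    rcases h with ⟨q, hq, rfl⟩ | ⟨q, hq, rfl⟩ <;> simp [ih hq]

lemma pvTuples_mem01 {n : Nat} {p : List Int} (h : p ∈ pvTuples n) : ∀ x ∈ p, x = 0 ∨ x = 1 := by
  induction n generalizing p with
  | zero => simp [pvTuples] at h; simp [h]
  | succ n ih =>
    simp only [pvTuples, List.mem_append, List.mem_map] at h
    rcases h with ⟨q, hq, rfl⟩ | ⟨q, hq, rfl⟩ <;>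
      · intro x hx
        rcases List.mem_cons.mp hx with rfl | hx
        · simp
        · exact ih hq x hx

lemma pvCheckNat (p : List Int) :
    (List.range (p.length - 1)).any
        (fun k => decide (p.getD k 0 = 1) && decide (p.getD (k + 1) 0 = 1)) = pvHasAdj p := by
  induction p with
  | nil => simp [pvHasAdj]
  | cons a rest ih =>
    cases rest with
    | nil => simp [pvHasAdj]
    | cons b q =>
      have hl : (a :: b :: q).length - 1 = q.length + 1 := by simp
      rw [hl, List.range_succ_eq_map]
      have hmap : (List.map Nat.succ (List.range q.length)).any
            (fun k => decide ((a :: b :: q).getD k 0 = 1) &&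
              decide ((a :: b :: q).getD (k + 1) 0 = 1))
          = (List.range ((b :: q).length - 1)).any
            (fun k => decide ((b :: q).getD k 0 = 1) && decide ((b :: q).getD (k + 1) 0 = 1)) := by
        rw [List.any_map]
        apply PySem.List.any_congr_mem
        intro k _
        simp [Function.comp]
      simp only [List.any_cons, hmap, ih]
      simp [pvHasAdj]

lemma pvCheckA_eq_hasAdj (p : List Int) (W : Int) (h : W - 2 = (p.length : Int) - 1) :
    pvCheckA W p = pvHasAdj p := by
  unfold pvCheckA
  rw [List.any_map]
  cases p with
  | nil =>
    have : W - 2 = -1 := by simpa using h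
    rw [this, PySem.List.pyRange_one_eq_nil (by norm_num)]
    simp [pvHasAdj]
  | cons a rest =>
    have h2 : W - 2 = ((a :: rest).length - 1 : Nat) := by
      simp only [List.length_cons] at h ⊢
      push_cast at h ⊢
      omega
    rw [h2, PySem.List.pyRange_zero_natCast, List.any_map]
    rw [← pvCheckNat (a :: rest)]
    apply PySem.List.any_congr_mem
    intro k _
    have h1 : ((k : Int) + 1) = ((k + 1 : Nat) : Int) := by push_cast; ring
    simp only [Function.comp_apply, id_eq, h1, PySem.List.pyGetD_natCast]

lemma pvFilter_map_zero (l : List (List Int)) :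
    (l.map (fun p => 0 :: p)).filter (fun p => !pvHasAdj p)
      = ((l.filter (fun p => !pvHasAdj p)).map (fun p => 0 :: p)) := by
  rw [List.filter_map]
  congr 1
  apply List.filter_congr
  intro p _
  simp [Function.comp, pvHasAdj_cons_zero]

lemma pvFilter_tuples (n : Nat) :
    (pvTuples n).filter (fun p => !pvHasAdj p) = pvPatterns n := by
  have key : ∀ m, ((pvTuples m).filter (fun p => !pvHasAdj p) = pvPatterns m) ∧
      ((pvTuples (m + 1)).filter (fun p => !pvHasAdj p) = pvPatterns (m + 1)) := by
    intro m
    induction m with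
    | zero => constructor <;> decide
    | succ m ih =>
      refine ⟨ih.2, ?_⟩
      show (pvTuples (m + 2)).filter (fun p => !pvHasAdj p) = pvPatterns (m + 2)
      have expand : pvTuples (m + 2)
          = (pvTuples (m + 1)).map (fun p => 0 :: p)
            ++ ((pvTuples m).map (fun p => 0 :: p)).map (fun p => 1 :: p)
            ++ ((pvTuples m).map (fun p => 1 :: p)).map (fun p => 1 :: p) := by
        simp [pvTuples, List.map_append, List.append_assoc]
      rw [expand, List.filter_append, List.filter_append]
      have h1 := pvFilter_map_zero (pvTuples (m + 1))
      have h2 : (((pvTuples m).map (fun p => 0 :: p)).map (fun p => 1 :: p)).filter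
            (fun p => !pvHasAdj p)
          = ((pvTuples m).filter (fun p => !pvHasAdj p)).map (fun p => 1 :: 0 :: p) := by
        rw [List.map_map, List.filter_map]
        congr 1
        apply List.filter_congr
        intro p _
        simp [Function.comp, pvHasAdj_one_zero]
      have h3 : (((pvTuples m).map (fun p => 1 :: p)).map (fun p => 1 :: p)).filter
            (fun p => !pvHasAdj p) = [] := by
        rw [List.map_map]
        apply List.filter_eq_nil_iff.mpr
        intro p hp
        rcases List.mem_map.mp hp with ⟨q, _, rfl⟩
        simp [Function.comp, pvHasAdj_one_one]
      rw [h1, h2, h3, ih.1, ih.2]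
      simp [pvPatterns]
  exact (key n).1

lemma pvPatterns_mem {n : Nat} {p : List Int} (h : p ∈ pvPatterns n) :
    p.length = n ∧ pvHasAdj p = false ∧ ∀ x ∈ p, x = 0 ∨ x = 1 := by
  rw [← pvFilter_tuples] at h
  have h' := List.mem_filter.mp h
  refine ⟨pvTuples_length h'.1, by simpa using h'.2, pvTuples_mem01 h'.1⟩

lemma pvSwapLoop (m : Nat) : ∀ (q done p : List Int) (n : Nat),
    q.length = m →
    done.length + q.length = n →
    (∀ (j : Nat), PySem.List.pyGetD p ((done.length : Int) + j) 0 = q.getD j 0) →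
    pvHasAdj q = false → (∀ x ∈ q, x = 0 ∨ x = 1) →
    (PySem.List.pyRange (done.length : Int) (n : Int) 1).foldl (pvStep p)
        (done ++ PySem.List.pyRange (done.length : Int) ((n : Int) + 1) 1)
      = done ++ pvAfterOf (done.length : Int) q := by
  induction m using Nat.strong_induction_on with
  | _ m ih =>
  intro q done p n hm hlen hq hadj h01
  cases q with
  | nil =>
    have hkn : done.length = n := by simpa using hlen
    subst hkn
    rw [PySem.List.pyRange_one_eq_nil (le_refl _), PySem.List.pyRange_one_singleton]
    simp [pvAfterOf]
  | cons b q' =>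
    have hkn : done.length < n := by simp at hlen; omega
    have hki : (done.length : Int) < (n : Int) := by exact_mod_cast hkn
    have hb : PySem.List.pyGetD p (done.length : Int) 0 = b := by
      have h0 := hq 0
      simpa using h0
    rw [PySem.List.pyRange_one_cons hki, List.foldl_cons]
    rcases h01 b (by simp) with hb0 | hb1
    · -- b = 0 : the swap is skipped
      subst hb0
      have hstep : pvStep p (done ++ PySem.List.pyRange (done.length : Int) ((n : Int) + 1) 1)
          (done.length : Int)
          = done ++ PySem.List.pyRange (done.length : Int) ((n : Int) + 1) 1 := by
        simp [pvStep, hb]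
      rw [hstep]
      have hsplit : done ++ PySem.List.pyRange (done.length : Int) ((n : Int) + 1) 1
          = (done ++ [(done.length : Int)])
            ++ PySem.List.pyRange ((done.length : Int) + 1) ((n : Int) + 1) 1 := by
        rw [PySem.List.pyRange_one_cons (by omega : (done.length : Int) < (n : Int) + 1)]
        simp
      have hcast : (((done ++ [(done.length : Int)]).length : Nat) : Int)
          = (done.length : Int) + 1 := by
        simp
      have ihres := ih q'.length (by simp at hm; omega) q' (done ++ [(done.length : Int)]) p n rfl
        (by simp only [List.length_append, List.length_cons, List.length_nil] at hlen ⊢; omega)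
        (fun j => by
          have h := hq (j + 1)
          have e : (((done ++ [(done.length : Int)]).length : Nat) : Int) + (j : Int)
              = (done.length : Int) + ((j + 1 : Nat) : Int) := by
            simp; ring
          rw [e, h, List.getD_cons_succ])
        (by rw [← pvHasAdj_cons_zero q']; exact hadj)
        (fun x hx => h01 x (List.mem_cons_of_mem _ hx))
      rw [hcast] at ihres
      rw [hsplit, ihres, pvAfterOf_cons_zero]
      simp
    · -- b = 1 : the swap fires, and validity forces the next bit (if any) to be 0
      subst hb1
      have e1 : PySem.List.pyRange (done.length : Int) ((n : Int) + 1) 1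
          = (done.length : Int) :: ((done.length : Int) + 1)
            :: PySem.List.pyRange ((done.length : Int) + 2) ((n : Int) + 1) 1 := by
        rw [PySem.List.pyRange_one_cons (by omega : (done.length : Int) < (n : Int) + 1),
          PySem.List.pyRange_one_cons (by omega : (done.length : Int) + 1 < (n : Int) + 1)]
        ring_nf
      set R := PySem.List.pyRange ((done.length : Int) + 2) ((n : Int) + 1) 1 with hR
      have ck1 : (done.length : Int) + 1 = ((done.length + 1 : Nat) : Int) := by push_cast; ring
      have hg0 : PySem.List.pyGetD
            (done ++ ((done.length : Int) :: ((done.length : Int) + 1) :: R)) (done.length : Int) 0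
          = (done.length : Int) := by
        rw [PySem.List.pyGetD_natCast, List.getD_append_right _ _ _ _ (le_refl _), Nat.sub_self]
        rfl
      have hg1 : PySem.List.pyGetD
            (done ++ ((done.length : Int) :: ((done.length : Int) + 1) :: R))
            ((done.length : Int) + 1) 0
          = (done.length : Int) + 1 := by
        rw [ck1, PySem.List.pyGetD_natCast,
          List.getD_append_right _ _ _ _ (Nat.le_succ _)]
        have e : done.length + 1 - done.length = 1 := by omega
        rw [e]
        rfl
      have hs : PySem.List.pySetD
            (PySem.List.pySetD
              (done ++ ((done.length : Int) :: ((done.length : Int) + 1) :: R))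
              (done.length : Int) ((done.length : Int) + 1))
            ((done.length : Int) + 1) (done.length : Int)
          = done ++ (((done.length : Int) + 1) :: (done.length : Int) :: R) := by
        rw [ck1, PySem.List.pySetD_natCast, PySem.List.pySetD_natCast]
        rw [List.set_append, if_neg (by omega), Nat.sub_self]
        rw [List.set_append, if_neg (by omega)]
        have e : done.length + 1 - done.length = 1 := by omega
        rw [e]
        rfl
      have hstep : pvStep p
            (done ++ PySem.List.pyRange (done.length : Int) ((n : Int) + 1) 1) (done.length : Int)
          = done ++ (((done.length : Int) + 1) :: (done.length : Int) :: R) := by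
        rw [e1]
        unfold pvStep
        rw [hb, if_pos (by norm_num), hg0, hg1, hs]
      rw [hstep]
      cases q' with
      | nil =>
        have hn1 : n = done.length + 1 := by simp at hlen; omega
        have hrest : PySem.List.pyRange ((done.length : Int) + 1) (n : Int) 1 = [] := by
          apply PySem.List.pyRange_one_eq_nil
          rw [hn1]; omega
        have hRnil : R = [] := by
          rw [hR]
          apply PySem.List.pyRange_one_eq_nil
          rw [hn1]; omega
        rw [hrest, hRnil, List.foldl_nil, pvAfterOf_one_nil]
      | cons c q'' =>
        have hc : c = 0 := by
          rcases h01 c (by simp) with h | h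
          · exact h
          · exfalso
            subst h
            rw [pvHasAdj_one_one] at hadj
            exact absurd hadj (by simp)
        subst hc
        have hk1n : (done.length : Int) + 1 < (n : Int) := by
          simp at hlen; omega
        rw [PySem.List.pyRange_one_cons hk1n, List.foldl_cons]
        have hskip : PySem.List.pyGetD p ((done.length : Int) + 1) 0 = 0 := by
          have h := hq 1
          simpa using h
        have hstep2 : pvStep p
              (done ++ (((done.length : Int) + 1) :: (done.length : Int) :: R))
              ((done.length : Int) + 1)
            = done ++ (((done.length : Int) + 1) :: (done.length : Int) :: R) := by
          simp [pvStep, hskip]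
        rw [hstep2]
        have hsplit : done ++ (((done.length : Int) + 1) :: (done.length : Int) :: R)
            = (done ++ [(done.length : Int) + 1, (done.length : Int)]) ++ R := by
          simp
        have hcast2 : (((done ++ [(done.length : Int) + 1, (done.length : Int)]).length : Nat) : Int)
            = (done.length : Int) + 2 := by
          simp
        have ihres := ih q''.length (by simp at hm; omega) q''
          (done ++ [(done.length : Int) + 1, (done.length : Int)]) p n rfl
          (by simp only [List.length_append, List.length_cons, List.length_nil] at hlen ⊢; omega)
          (fun j => by
            have h := hq (j + 2)
            have e : (((done ++ [(done.length : Int) + 1, (done.length : Int)]).length : Nat) : Int)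
                + (j : Int)
                = (done.length : Int) + ((j + 2 : Nat) : Int) := by
              simp; ring
            rw [e, h, List.getD_cons_succ, List.getD_cons_succ])
          (by rw [← pvHasAdj_one_zero q'']; exact hadj)
          (fun x hx => h01 x (List.mem_cons_of_mem _ (List.mem_cons_of_mem _ hx)))
        rw [hcast2] at ihres
        have e2 : (done.length : Int) + 1 + 1 = (done.length : Int) + 2 := by ring
        rw [hsplit, e2, ihres, pvAfterOf_one_cons]
        simp

lemma pvAfterA_eq (W : Int) (p : List Int) (_hW : 1 ≤ W) (hlen : (p.length : Int) = W - 1)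
    (hadj : pvHasAdj p = false) (h01 : ∀ x ∈ p, x = 0 ∨ x = 1) :
    pvAfterA W p = pvAfterOf 0 p := by
  have h := pvSwapLoop p.length p [] p p.length rfl (by simp)
    (fun j => by simp) hadj h01
  simp only [List.length_nil, Nat.cast_zero, List.nil_append] at h
  have e1 : W - 1 = (p.length : Int) := by omega
  have e2 : W = (p.length : Int) + 1 := by omega
  rw [pvAfterA, e1, e2]
  simpa using h

lemma pvFold_eq (W : Int) (hW : 1 ≤ W) (init : PySem.Dict Int (PySem.Dict Int Int)) :
    (pvTuples (W - 1).toNat).foldl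
        (fun m p => if pvCheckA W p then m else pvTally m (pvAfterA W p)) init
      = (pvPatterns (W - 1).toNat).foldl (fun m p => pvTally m (pvAfterOf 0 p)) init := by
  set n := (W - 1).toNat with hn
  have hcast : ((n : Nat) : Int) = W - 1 := by
    rw [hn]; exact Int.toNat_of_nonneg (by omega)
  rw [PySem.List.foldl_congr_mem (pvTuples n)
    (fun m p => if pvCheckA W p then m else pvTally m (pvAfterA W p))
    (fun m p => if (!pvCheckA W p) then pvTally m (pvAfterA W p) else m) init
    (fun acc x _ => by cases h : pvCheckA W x <;> simp [h])]
  rw [PySem.List.foldl_if_eq_foldl_filter]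
  have hfc : (pvTuples n).filter (fun p => !pvCheckA W p)
      = (pvTuples n).filter (fun p => !pvHasAdj p) := by
    apply List.filter_congr
    intro p hp
    have hl := pvTuples_length hp
    have : W - 2 = (p.length : Int) - 1 := by rw [hl]; omega
    rw [pvCheckA_eq_hasAdj p W this]
  rw [hfc, pvFilter_tuples]
  apply PySem.List.foldl_congr_mem
  intro acc p hp
  obtain ⟨hl, hadj, h01⟩ := pvPatterns_mem hp
  rw [pvAfterA_eq W p hW (by rw [hl]; omega) hadj h01]

-- ===== VERDICT (by name: the statement is the Claim_ definition above) =====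
theorem one_row_spec : Claim_equal_one_row := by
  intro W _ hW
  unfold Spec_one_row one_row one_row_alt
  rw [pvFold_eq W hW]
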